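-- pv_equiv track=rewrite | github.com/f1r3k3rn/codeforces | contests/global 28/B.py | solve
-- ===== SOURCE A (Python) =====
-- def solve(n,k):
--     sol = 0
--
--     vet = [0] * n
--
--     start = 1
--
--     for i in range(1,n + 1):
--
--         if i * k - 1 >= n:
--             break
--         vet[i * k - 1] = i
--         start += 1
--
--     for i in range(n):
--         if vet[i] == 0:
--             vet[i] = start
--             start += 1
--
--     return " ".join(map(str, vet))
-- ===== SOURCE B (Python) =====
-- def solve(n, k):
--     m = n // k
--     counter = m + 1
--     vet = []
--     for p in range(n):
--         if (p + 1) % k == 0: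
--             vet.append((p + 1) // k)
--         else:
--             vet.append(counter)
--             counter += 1
--     return " ".join(map(str, vet))
-- ===== Notes on version B (the rewrite author's own statement) =====
-- stated objective: simpler
-- what changed: A scatters markers into a zero-filled array in one loop and then makes a second fill pass over it; B decides every cell directly in a single pass with a closed-form marker test (p+1) % k == 0 and a running fill counter starting at n//k + 1.
-- outside the precondition, e.g. on solve(5, 0): A returns '6 7 8 9 5', B raises ZeroDivisionError
import Mathlib
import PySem

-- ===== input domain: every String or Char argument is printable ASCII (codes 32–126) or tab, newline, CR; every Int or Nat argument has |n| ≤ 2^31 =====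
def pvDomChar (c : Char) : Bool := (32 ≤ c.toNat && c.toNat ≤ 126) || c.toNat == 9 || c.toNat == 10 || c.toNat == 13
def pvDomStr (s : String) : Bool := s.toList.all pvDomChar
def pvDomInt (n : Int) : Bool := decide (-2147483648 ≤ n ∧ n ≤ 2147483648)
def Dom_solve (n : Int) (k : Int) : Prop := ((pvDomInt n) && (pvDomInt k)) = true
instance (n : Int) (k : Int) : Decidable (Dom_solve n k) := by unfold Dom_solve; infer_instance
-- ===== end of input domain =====

-- B replaces A's scatter-then-fill two passes by one pass that decides each cell with a
-- closed-form marker test; objective: simpler.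

-- ===== PORT A =====
-- Python 'vet[i] = v' (index may be negative: wraparound). Where Python would raise
-- IndexError the returned list is unchanged; such inputs lie outside Pre_solve.
def pySetAssign (xs : List Int) (i v : Int) : List Int :=
  let j : Int := if i < 0 then i + xs.length else i
  if 0 ≤ j ∧ j < xs.length then xs.set j.toNat v else xs

-- first loop: for i in range(1, n+1): if i*k-1 >= n: break; vet[i*k-1] = i; start += 1
def solveA1 (n k : Int) : List Int → List Int → Int → List Int × Int
  | [], vet, start => (vet, start)
  | i :: rest, vet, start =>
    if i * k - 1 ≥ n then (vet, start)
    else solveA1 n k rest (pySetAssign vet (i * k - 1) i) (start + 1)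

-- second loop: for i in range(n): if vet[i] == 0: vet[i] = start; start += 1
def solveA2 : List Int → Int → List Int
  | [], _ => []
  | x :: rest, start =>
    if x = 0 then start :: solveA2 rest (start + 1)
    else x :: solveA2 rest start

def solve (n : Int) (k : Int) : String :=
  let vet0 := List.replicate n.toNat (0 : Int)   -- [0] * n  ([] for n ≤ 0)
  let r := solveA1 n k (PySem.List.pyRange 1 (n + 1) 1) vet0 1
  PySem.Str.join " " ((solveA2 r.1 r.2).map PySem.Int.toStr)

-- ===== PORT B =====
-- for p in range(n): append (p+1)//k if (p+1) % k == 0 else counter (then counter += 1)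
def solveB (k : Int) : List Int → List Int → Int → List Int
  | [], vet, _ => vet
  | p :: rest, vet, counter =>
    if PySem.Int.mod (p + 1) k = 0 then
      solveB k rest (vet ++ [PySem.Int.floordiv (p + 1) k]) counter
    else
      solveB k rest (vet ++ [counter]) (counter + 1)

def solve_alt (n : Int) (k : Int) : String :=
  let m := PySem.Int.floordiv n k
  let vet := solveB k (PySem.List.pyRange 0 n 1) [] (m + 1)
  PySem.Str.join " " (vet.map PySem.Int.toStr)

-- ===== PRECONDITION & SPEC =====
-- Pre_ excludes k = 0, where A's returned value is an artefact of Python's negative-index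
-- wraparound vet[-1] and B itself raises ZeroDivisionError, and k < 0 with n ≥ 1, where A
-- raises IndexError.
def Pre_solve (n : Int) (k : Int) : Prop := 1 ≤ k ∨ (n ≤ 0 ∧ k ≠ 0)
instance (n : Int) (k : Int) : Decidable (Pre_solve n k) := by unfold Pre_solve; infer_instance
def pvWitness_solve : Int × Int := (5, 2)
def Spec_solve (n : Int) (k : Int) (out : String) : Prop := out = solve_alt n k
instance (n : Int) (k : Int) (out : String) : Decidable (Spec_solve n k out) := by unfold Spec_solve; infer_instance

-- ===== CLAIM (what is proved, stated in full; the proofs are below) =====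
def Claim_equal_solve : Prop := ∀ (n : Int) (k : Int), Dom_solve n k → Pre_solve n k → Spec_solve n k (solve n k)

-- ===== LEMMAS AND PROOFS =====

-- the marker pattern left in vet by A's first loop
def markf (k q : Int) : Int :=
  if PySem.Int.mod (q + 1) k = 0 then PySem.Int.floordiv (q + 1) k else 0

lemma map_getD_range_self (xs : List Int) :
    (List.range xs.length).map (fun q => xs.getD q 0) = xs := by
  apply List.ext_getElem
  · simp
  · intro i h1 h2
    simp [List.getD, List.getElem?_eq_getElem h2]

lemma solveA1_spec (n k : Int) (hk : 1 ≤ k) :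
    ∀ (t : Nat) (a : Int) (vet : List Int) (start : Int), 1 ≤ a → vet.length = n.toNat →
      (n + 1 - a).toNat ≤ t →
      solveA1 n k (PySem.List.pyRange a (n + 1) 1) vet start
        = ((List.range n.toNat).map (fun (q : Nat) =>
              if PySem.Int.mod ((q : Int) + 1) k = 0 ∧ a * k ≤ (q : Int) + 1
              then PySem.Int.floordiv ((q : Int) + 1) k else vet.getD q 0),
           start + max (PySem.Int.floordiv n k - a + 1) 0) := by
  intro t
  induction t with
  | zero =>
    intro a vet start ha hlen hle
    have hna : n + 1 ≤ a := by omega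
    rw [PySem.List.pyRange_one_eq_nil hna, solveA1]
    have hmlt : PySem.Int.floordiv n k < a := by
      rw [PySem.Int.floordiv_lt_iff_lt_mul (by omega)]
      have : a * 1 ≤ a * k := by
        apply mul_le_mul_of_nonneg_left hk; omega
      omega
    rw [Prod.mk.injEq]
    constructor
    · symm
      have hveq := map_getD_range_self vet
      rw [hlen] at hveq
      conv_rhs => rw [← hveq]
      apply List.map_congr_left
      intro q hq
      rw [List.mem_range] at hq
      rw [if_neg]
      rintro ⟨-, hge⟩
      have hq' : (q : Int) + 1 ≤ n := by omega
      have : a * 1 ≤ a * k := by apply mul_le_mul_of_nonneg_left hk; omega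
      omega
    · omega
  | succ t ih =>
    intro a vet start ha hlen hle
    by_cases hbreak : a * k - 1 ≥ n
    · -- loop breaks immediately (or the range is already empty)
      have hmlt : PySem.Int.floordiv n k < a := by
        rw [PySem.Int.floordiv_lt_iff_lt_mul (by omega)]; omega
      have hres : solveA1 n k (PySem.List.pyRange a (n + 1) 1) vet start = (vet, start) := by
        by_cases hcons : a < n + 1
        · rw [PySem.List.pyRange_one_cons hcons, solveA1, if_pos hbreak]
        · rw [PySem.List.pyRange_one_eq_nil (by omega), solveA1]
      rw [hres, Prod.mk.injEq]
      constructor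
      · symm
        have hveq := map_getD_range_self vet
        rw [hlen] at hveq
        conv_rhs => rw [← hveq]
        apply List.map_congr_left
        intro q hq
        rw [List.mem_range] at hq
        rw [if_neg]
        rintro ⟨-, hge⟩
        have hq' : (q : Int) + 1 ≤ n := by omega
        omega
      · omega
    · -- one marker is written, recurse
      have hak1 : 1 ≤ a * k := by
        have : 1 * 1 ≤ a * k := mul_le_mul ha hk (by omega) (by omega)
        omega
      have haa : a ≤ a * k := by
        have : a * 1 ≤ a * k := by apply mul_le_mul_of_nonneg_left hk; omega
        omega
      have ham : a ≤ PySem.Int.floordiv n k := by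
        rw [PySem.Int.le_floordiv_iff_mul_le (by omega)]; omega
      have hcons : a < n + 1 := by omega
      rw [PySem.List.pyRange_one_cons hcons, solveA1, if_neg (by omega)]
      have hset : pySetAssign vet (a * k - 1) a = vet.set (a * k - 1).toNat a := by
        rw [pySetAssign]
        simp only [if_neg (by omega : ¬ a * k - 1 < 0)]
        rw [if_pos]
        constructor
        · omega
        · rw [hlen]; omega
      rw [hset]
      rw [ih (a + 1) _ (start + 1) (by omega) (by rw [List.length_set, hlen]) (by omega)]
      rw [Prod.mk.injEq]
      constructor
      · apply List.map_congr_left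
        intro q hq
        rw [List.mem_range] at hq
        have hqn : (q : Int) + 1 ≤ n := by omega
        have hdistrib : (a + 1) * k = a * k + k := by ring
        by_cases h2 : PySem.Int.mod ((q : Int) + 1) k = 0 ∧ a * k ≤ (q : Int) + 1
        · rw [if_pos h2]
          by_cases h1 : (a + 1) * k ≤ (q : Int) + 1
          · rw [if_pos ⟨h2.1, h1⟩]
          · -- q + 1 = a * k : the freshly written marker cell
            rw [if_neg (by tauto)]
            have hdvd : k ∣ (q : Int) + 1 := (PySem.Int.mod_eq_zero_iff_dvd _ _).mp h2.1
            obtain ⟨c, hc⟩ := hdvd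
            have hca : c = a := by
              have hmc : a * k = k * a := by ring
              have hmc2 : a * k + k = k * (a + 1) := by ring
              have hc1 : k * a ≤ k * c := by omega
              have hc2 : k * c < k * (a + 1) := by omega
              have hle1 := le_of_mul_le_mul_left hc1 (by omega : (0 : Int) < k)
              have hlt1 := lt_of_mul_lt_mul_left hc2 (by omega : (0 : Int) ≤ k)
              omega
            have heq : (q : Int) + 1 = a * k := by rw [hc, hca]; ring
            have hfd : PySem.Int.floordiv ((q : Int) + 1) k = a :=
              (PySem.Int.floordiv_eq_iff_of_pos (by omega : (0 : Int) < k)).mpr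
                ⟨by omega, by omega⟩
            rw [hfd]
            have hidx : (a * k - 1).toNat = q := by omega
            rw [hidx]
            have hql : q < vet.length := by rw [hlen]; omega
            simp [List.getD, hql]
        · rw [if_neg h2, if_neg (by rintro ⟨hm', hge'⟩; exact h2 ⟨hm', by omega⟩)]
          have hneq : (q : Int) + 1 ≠ a * k := by
            intro heq
            apply h2
            constructor
            · rw [PySem.Int.mod_eq_zero_iff_dvd, heq]; exact ⟨a, by ring⟩
            · omega
          have hqne : (a * k - 1).toNat ≠ q := by omega
          simp only [List.getD]
          rw [List.getElem?_set_ne hqne]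
      · omega

lemma solveB_append (k : Int) :
    ∀ (l acc : List Int) (c : Int), solveB k l acc c = acc ++ solveB k l [] c := by
  intro l
  induction l with
  | nil => intro acc c; simp [solveB]
  | cons p rest ih =>
    intro acc c
    by_cases h : PySem.Int.mod (p + 1) k = 0
    · simp only [solveB, if_pos h]
      rw [ih (acc ++ [PySem.Int.floordiv (p + 1) k]), ih ([] ++ [PySem.Int.floordiv (p + 1) k])]
      simp
    · simp only [solveB, if_neg h]
      rw [ih (acc ++ [c]), ih ([] ++ [c])]
      simp

lemma solveA2_eq_solveB (k : Int) (hk : 1 ≤ k) :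
    ∀ (t : Nat) (p nn c : Int), 0 ≤ p → (nn - p).toNat ≤ t →
      solveA2 ((PySem.List.pyRange p nn 1).map (fun q => markf k q)) c
        = solveB k (PySem.List.pyRange p nn 1) [] c := by
  intro t
  induction t with
  | zero =>
    intro p nn c hp hle
    rw [PySem.List.pyRange_one_eq_nil (by omega)]
    simp [solveA2, solveB]
  | succ t ih =>
    intro p nn c hp hle
    by_cases hpn : p < nn
    · rw [PySem.List.pyRange_one_cons hpn, List.map_cons]
      by_cases hm : PySem.Int.mod (p + 1) k = 0
      · have hdvd : k ∣ p + 1 := (PySem.Int.mod_eq_zero_iff_dvd _ _).mp hm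
        have hge : k ≤ p + 1 := Int.le_of_dvd (by omega) hdvd
        have hfd : 1 ≤ PySem.Int.floordiv (p + 1) k := by
          rw [PySem.Int.le_floordiv_iff_mul_le (by omega)]; omega
        rw [markf, if_pos hm, solveA2, if_neg (by omega)]
        rw [solveB, if_pos hm, solveB_append]
        simp only [List.nil_append, List.cons_append, List.nil_append]
        rw [ih (p + 1) nn c (by omega) (by omega)]
      · rw [markf, if_neg hm, solveA2, if_pos rfl]
        rw [solveB, if_neg hm, solveB_append]
        simp only [List.nil_append, List.cons_append, List.nil_append]
        rw [ih (p + 1) nn (c + 1) (by omega) (by omega)]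
    · rw [PySem.List.pyRange_one_eq_nil (by omega)]
      simp [solveA2, solveB]

-- ===== VERDICT (by name: the statement is the Claim_ definition above) =====
theorem solve_spec : Claim_equal_solve := by
  intro n k hdom hpre
  unfold Spec_solve
  by_cases hn : n ≤ 0
  · have h1 : PySem.List.pyRange 1 (n + 1) 1 = [] := PySem.List.pyRange_one_eq_nil (by omega)
    have h2 : PySem.List.pyRange 0 n 1 = [] := PySem.List.pyRange_one_eq_nil (by omega)
    have h3 : n.toNat = 0 := by omega
    simp [solve, solve_alt, h1, h2, h3, solveA1, solveA2, solveB]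
  · have hn1 : 1 ≤ n := by omega
    have hk : 1 ≤ k := by
      rcases hpre with h | h
      · exact h
      · omega
    have hm0 : 0 ≤ PySem.Int.floordiv n k := by
      rw [PySem.Int.le_floordiv_iff_mul_le (by omega)]; omega
    have hA1 := solveA1_spec n k hk (n + 1 - 1).toNat 1 (List.replicate n.toNat 0) 1
      (le_refl 1) (by simp) (le_refl _)
    rw [solve, solve_alt, hA1]
    have hmark : (List.range n.toNat).map (fun (q : Nat) =>
        if PySem.Int.mod ((q : Int) + 1) k = 0 ∧ 1 * k ≤ (q : Int) + 1
        then PySem.Int.floordiv ((q : Int) + 1) k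
        else (List.replicate n.toNat (0 : Int)).getD q 0)
        = (PySem.List.pyRange 0 n 1).map (fun q => markf k q) := by
      rw [PySem.List.pyRange_zero, List.map_map]
      apply List.map_congr_left
      intro q hq
      rw [List.mem_range] at hq
      simp only [Function.comp_apply, markf]
      by_cases hmq : PySem.Int.mod ((q : Int) + 1) k = 0
      · have hdvd : k ∣ (q : Int) + 1 := (PySem.Int.mod_eq_zero_iff_dvd _ _).mp hmq
        have hge : k ≤ (q : Int) + 1 := Int.le_of_dvd (by omega) hdvd
        rw [if_pos ⟨hmq, by omega⟩, if_pos hmq]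
      · rw [if_neg (by tauto), if_neg hmq]
        simp only [List.getD, List.getElem?_replicate]
        split <;> rfl
    have hmax : 1 + max (PySem.Int.floordiv n k - 1 + 1) 0 = PySem.Int.floordiv n k + 1 := by
      omega
    simp only at hmark ⊢
    rw [hmark, hmax]
    rw [solveA2_eq_solveB k hk (n - 0).toNat 0 n (PySem.Int.floordiv n k + 1) (le_refl 0) (le_refl _)]
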